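-- pv_equiv track=rewrite | github.com/calcorum/vagabond-rpg-foundryvtt | scripts/validate_spells.py | parse_source_spells
-- ===== SOURCE A (Python) =====
-- def parse_source_spells(text):
--     """Parse source spell data into a dictionary."""
--     spells = {}
--     current_spell = None
--     current_damage = None
--     effect_lines = []
--     crit_lines = []
--     in_crit = False
--
--     for line in text.strip().split('\n'):
--         line = line.rstrip()
--
--         # New spell header
--         if line.startswith('## '):
--             # Save previous spell
--             if current_spell:
--                 effect = '\n'.join(effect_lines).strip()
--                 crit = '\n'.join(crit_lines).strip()
--                 spells[current_spell.lower()] = {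
--                     'name': current_spell,
--                     'damage': current_damage,
--                     'effect': effect,
--                     'crit': crit
--                 }
--
--             current_spell = line[3:].strip()
--             current_damage = None
--             effect_lines = []
--             crit_lines = []
--             in_crit = False
--
--         elif line.startswith('**Damage Base:**'):
--             damage = line.replace('**Damage Base:**', '').strip()
--             current_damage = '' if damage == '-' else damage.lower()
--
--         elif line.startswith('**Crit:**'):
--             in_crit = True
--             crit_text = line.replace('**Crit:**', '').strip()
--             if crit_text:
--                 crit_lines.append(crit_text)
--
--         elif current_spell and line and not line.startswith('---'):
--             if in_crit:
--                 crit_lines.append(line)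
--             else:
--                 effect_lines.append(line)
--
--     # Save last spell
--     if current_spell:
--         effect = '\n'.join(effect_lines).strip()
--         crit = '\n'.join(crit_lines).strip()
--         spells[current_spell.lower()] = {
--             'name': current_spell,
--             'damage': current_damage,
--             'effect': effect,
--             'crit': crit
--         }
--
--     return spells
-- ===== SOURCE B (Python) =====
-- def parse_source_spells(text):
--     """Parse source spell data into a dictionary.
--
--     Two-phase decomposition: first partition the lines into spell blocks
--     (one per '## ' header, discarding lines before the first header), then
--     parse each block independently.
--     """
--     lines = [l.rstrip() for l in text.strip().split('\n')]
--
--     # Phase 1: partition into (header_name, body_lines) blocks.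
--     blocks = []
--     cur = None
--     for line in lines:
--         if line.startswith('## '):
--             if cur is not None:
--                 blocks.append(cur)
--             cur = (line[3:].strip(), [])
--         elif cur is not None:
--             cur[1].append(line)
--     if cur is not None:
--         blocks.append(cur)
--
--     # Phase 2: parse each block on its own.
--     spells = {}
--     for name, body in blocks:
--         if not name:
--             continue
--         damage = None
--         effect_lines = []
--         crit_lines = []
--         in_crit = False
--         for line in body:
--             if line.startswith('**Damage Base:**'):
--                 d = line.replace('**Damage Base:**', '').strip()
--                 damage = '' if d == '-' else d.lower()
--             elif line.startswith('**Crit:**'):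
--                 in_crit = True
--                 t = line.replace('**Crit:**', '').strip()
--                 if t:
--                     crit_lines.append(t)
--             elif line and not line.startswith('---'):
--                 if in_crit:
--                     crit_lines.append(line)
--                 else:
--                     effect_lines.append(line)
--         spells[name.lower()] = {
--             'name': name,
--             'damage': damage,
--             'effect': '\n'.join(effect_lines).strip(),
--             'crit': '\n'.join(crit_lines).strip(),
--         }
--     return spells
-- ===== Notes on version B (the rewrite author's own statement) =====
-- stated objective: alternative
-- what changed: Replaces A's single pass with six pieces of mutable carried state by a two-phase decomposition: first partition the lines into (header, body) spell blocks, then parse each block independently with only its local state.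
import Mathlib
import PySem

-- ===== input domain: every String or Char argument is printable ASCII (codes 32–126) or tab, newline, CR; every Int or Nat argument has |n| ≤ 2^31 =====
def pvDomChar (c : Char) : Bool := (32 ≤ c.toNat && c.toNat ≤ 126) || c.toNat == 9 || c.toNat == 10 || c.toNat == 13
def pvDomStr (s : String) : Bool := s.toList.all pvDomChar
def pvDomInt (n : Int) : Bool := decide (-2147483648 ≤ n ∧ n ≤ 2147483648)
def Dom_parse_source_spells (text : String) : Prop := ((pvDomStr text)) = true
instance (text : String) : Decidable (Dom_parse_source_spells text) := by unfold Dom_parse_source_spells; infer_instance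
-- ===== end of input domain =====

-- B replaces A's single six-variable state machine by a two-phase decomposition (partition into
-- spell blocks, then parse each block independently); objective: alternative structure, same cost.

-- shared line tests / extractors (the same string literals both Pythons test against)
def pvIsHeader (line : String) : Bool := PySem.Str.startswith line "## "
def pvIsDamage (line : String) : Bool := PySem.Str.startswith line "**Damage Base:**"
def pvIsCrit (line : String) : Bool := PySem.Str.startswith line "**Crit:**"
def pvIsContent (line : String) : Bool := line != "" && !(PySem.Str.startswith line "---")
def pvName (line : String) : String := PySem.Str.strip (PySem.Str.slice line (some 3) none)
def pvDamageVal (line : String) : Option String :=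
  let d := PySem.Str.strip (PySem.Str.replace line "**Damage Base:**" "")
  some (if d = "-" then "" else PySem.Str.lower d)
def pvCritText (line : String) : String := PySem.Str.strip (PySem.Str.replace line "**Crit:**" "")

-- ===== PORT A =====
-- the spell dict built at each save point (Python's dict literal, in its key order)
def pvEntryA (name : String) (dmg : Option String) (eff crit : List String) :
    List (String × Option String) :=
  [("name", some name), ("damage", dmg),
   ("effect", some (PySem.Str.strip (PySem.Str.join "\n" eff))),
   ("crit", some (PySem.Str.strip (PySem.Str.join "\n" crit)))]

-- 'if current_spell: spells[current_spell.lower()] = {…}'  (None and "" are falsy)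
def pvSaveA (spells : PySem.Dict String (List (String × Option String)))
    (cur : Option String) (dmg : Option String) (eff crit : List String) :
    PySem.Dict String (List (String × Option String)) :=
  match cur with
  | some cs => if cs = "" then spells else spells.insert (PySem.Str.lower cs) (pvEntryA cs dmg eff crit)
  | none => spells

-- loop state: (spells, current_spell, current_damage, effect_lines, crit_lines, in_crit)
abbrev pvStA := PySem.Dict String (List (String × Option String)) ×
  Option String × Option String × List String × List String × Bool

-- one iteration of A's for-loop
def pvStepA : pvStA → String → pvStA
  | (spells, cur, dmg, eff, crit, ic), line0 =>
    let line := PySem.Str.rstrip line0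
    if pvIsHeader line then
      (pvSaveA spells cur dmg eff crit, some (pvName line), none, [], [], false)
    else if pvIsDamage line then
      (spells, cur, pvDamageVal line, eff, crit, ic)
    else if pvIsCrit line then
      (spells, cur, dmg, eff,
       if pvCritText line = "" then crit else crit ++ [pvCritText line], true)
    else if (match cur with | some cs => cs != "" | none => false) && pvIsContent line then
      if ic then (spells, cur, dmg, eff, crit ++ [line], ic)
      else (spells, cur, dmg, eff ++ [line], crit, ic)
    else (spells, cur, dmg, eff, crit, ic)

def parse_source_spells (text : String) : List (String × List (String × Option String)) :=
  let r := ((PySem.Str.split? (PySem.Str.strip text) "\n").getD []).foldl pvStepA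
    (PySem.Dict.empty, none, none, [], [], false)
  (pvSaveA r.1 r.2.1 r.2.2.1 r.2.2.2.1 r.2.2.2.2.1).items

-- ===== PORT B =====
-- phase-1 state: (finished blocks, open block);  a block is (header name, body lines)
abbrev pvBlkSt := List (String × List String) × Option (String × List String)

def pvSplitStep : pvBlkSt → String → pvBlkSt
  | (done, cur), line =>
    if pvIsHeader line then
      ((match cur with | some c => done ++ [c] | none => done), some (pvName line, []))
    else
      match cur with
      | some nb => (done, some (nb.1, nb.2 ++ [line]))
      | none => (done, none)

def pvFlush (st : pvBlkSt) : List (String × List String) :=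
  match st.2 with | some c => st.1 ++ [c] | none => st.1

-- phase-2 per-block state: (damage, effect_lines, crit_lines, in_crit)
abbrev pvSt4 := Option String × List String × List String × Bool

def pvStepInner : pvSt4 → String → pvSt4
  | (dmg, eff, crit, ic), line =>
    if pvIsDamage line then
      (pvDamageVal line, eff, crit, ic)
    else if pvIsCrit line then
      (dmg, eff, if pvCritText line = "" then crit else crit ++ [pvCritText line], true)
    else if pvIsContent line then
      if ic then (dmg, eff, crit ++ [line], ic)
      else (dmg, eff ++ [line], crit, ic)
    else (dmg, eff, crit, ic)

def pvEntryB (name : String) (st : pvSt4) : List (String × Option String) :=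
  [("name", some name), ("damage", st.1),
   ("effect", some (PySem.Str.strip (PySem.Str.join "\n" st.2.1))),
   ("crit", some (PySem.Str.strip (PySem.Str.join "\n" st.2.2.1)))]

def pvInsStep (spells : PySem.Dict String (List (String × Option String)))
    (blk : String × List String) : PySem.Dict String (List (String × Option String)) :=
  if blk.1 = "" then spells
  else spells.insert (PySem.Str.lower blk.1)
    (pvEntryB blk.1 (blk.2.foldl pvStepInner (none, [], [], false)))

def parse_source_spells_alt (text : String) : List (String × List (String × Option String)) :=
  let lines := ((PySem.Str.split? (PySem.Str.strip text) "\n").getD []).map PySem.Str.rstrip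
  let blocks := pvFlush (lines.foldl pvSplitStep ([], none))
  (blocks.foldl pvInsStep PySem.Dict.empty).items

-- ===== PRECONDITION & SPEC =====
def Spec_parse_source_spells (text : String) (out : List (String × List (String × Option String))) : Prop := out = parse_source_spells_alt text
instance (text : String) (out : List (String × List (String × Option String))) : Decidable (Spec_parse_source_spells text out) := by unfold Spec_parse_source_spells; infer_instance

-- ===== CLAIM (what is proved, stated in full; the proofs are below) =====
def Claim_equal_parse_source_spells : Prop := ∀ (text : String), Dom_parse_source_spells text → Spec_parse_source_spells text (parse_source_spells text)

-- ===== LEMMAS AND PROOFS =====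
-- A's whole loop result, saved
def pvFinishA (st : pvStA) : PySem.Dict String (List (String × Option String)) :=
  pvSaveA st.1 st.2.1 st.2.2.1 st.2.2.2.1 st.2.2.2.2.1

-- finished blocks pass through phase 1 untouched
theorem pvFlush_foldl_done (ls : List String) (done : List (String × List String))
    (cur : Option (String × List String)) :
    pvFlush (ls.foldl pvSplitStep (done, cur)) = done ++ pvFlush (ls.foldl pvSplitStep ([], cur)) := by
  induction ls generalizing done cur with
  | nil => cases cur <;> simp [pvFlush]
  | cons l ls ih =>
    simp only [List.foldl_cons, pvSplitStep]
    by_cases h : pvIsHeader l = true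
    · simp only [h, if_pos]
      cases cur with
      | none => exact ih done _
      | some c =>
        simp only [List.nil_append]
        rw [ih (done ++ [c]), ih [c], List.append_assoc]
    · simp only [h, Bool.false_eq_true, if_false]
      cases cur with
      | none => exact ih done none
      | some c => exact ih done _

-- mid-block invariant: A's six-variable state versus B's open block
theorem pvL1 (ls : List String) (spells : PySem.Dict String (List (String × Option String)))
    (name : String) (d : Option String) (e c : List String) (i : Bool) (bacc : List String)
    (h : name ≠ "" → (d, e, c, i) = bacc.foldl pvStepInner (none, [], [], false)) :
    pvFinishA (ls.foldl pvStepA (spells, some name, d, e, c, i))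
      = (pvFlush ((ls.map PySem.Str.rstrip).foldl pvSplitStep ([], some (name, bacc)))).foldl
          pvInsStep spells := by
  induction ls generalizing spells name d e c i bacc with
  | nil =>
    simp only [List.foldl_nil, List.map_nil, pvFinishA, pvSaveA, pvFlush, List.foldl_cons,
      List.nil_append, pvInsStep]
    by_cases hn : name = ""
    · simp [hn]
    · simp only [if_neg hn]
      have := h hn
      rw [← this]
      rfl
  | cons l ls ih =>
    simp only [List.foldl_cons, List.map_cons, pvStepA, pvSplitStep]
    by_cases h1 : pvIsHeader (PySem.Str.rstrip l) = true
    · simp only [h1, if_pos]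
      rw [ih _ _ none [] [] false [] (fun _ => rfl)]
      conv_rhs => rw [pvFlush_foldl_done]
      rw [List.foldl_append]
      simp only [List.nil_append, List.foldl_cons, List.foldl_nil]
      have hsave : pvInsStep spells (name, bacc) = pvSaveA spells (some name) d e c := by
        simp only [pvSaveA, pvInsStep]
        by_cases hn : name = ""
        · simp [hn]
        · simp only [if_neg hn]
          rw [← h hn]
          rfl
      rw [hsave]
    · by_cases h2 : pvIsDamage (PySem.Str.rstrip l) = true
      · simp only [h1, h2, if_pos, Bool.false_eq_true, if_false]
        exact ih _ _ (pvDamageVal (PySem.Str.rstrip l)) e c i (bacc ++ [PySem.Str.rstrip l])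
          (fun hn => by
            rw [List.foldl_append, List.foldl_cons, List.foldl_nil, ← h hn, pvStepInner]
            simp [h2])
      · by_cases h3 : pvIsCrit (PySem.Str.rstrip l) = true
        · simp only [h1, h2, h3, if_pos, Bool.false_eq_true, if_false]
          exact ih _ _ d e _ true (bacc ++ [PySem.Str.rstrip l])
            (fun hn => by
              rw [List.foldl_append, List.foldl_cons, List.foldl_nil, ← h hn, pvStepInner]
              simp [h2, h3])
        · simp only [h1, h2, h3, Bool.false_eq_true, if_false]
          by_cases hn : name = ""
          · have hb : (name != "") = false := by simp [hn]
            simp only [hb, Bool.false_and, Bool.false_eq_true, if_false]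
            exact ih _ _ d e c i (bacc ++ [PySem.Str.rstrip l]) (fun hc => absurd hn hc)
          · have hb : (name != "") = true := by simp [hn]
            have hrest : ∀ d' e' c' i', (d', e', c', i') = pvStepInner (d, e, c, i) (PySem.Str.rstrip l) →
                pvFinishA (ls.foldl pvStepA (spells, some name, d', e', c', i'))
                  = (pvFlush ((ls.map PySem.Str.rstrip).foldl pvSplitStep
                      ([], some (name, bacc ++ [PySem.Str.rstrip l])))).foldl pvInsStep spells := by
              intro d' e' c' i' hst
              exact ih _ _ d' e' c' i' (bacc ++ [PySem.Str.rstrip l])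
                (fun hc => by rw [List.foldl_append, List.foldl_cons, List.foldl_nil, ← h hc, ← hst])
            by_cases h4 : pvIsContent (PySem.Str.rstrip l) = true
            · simp only [hb, h4, Bool.true_and, if_pos]
              by_cases hi : i = true
              · simp only [hi, if_pos]
                refine hrest d e (c ++ [PySem.Str.rstrip l]) true ?_
                rw [pvStepInner]
                simp [h2, h3, h4, hi]
              · simp only [Bool.not_eq_true] at hi
                simp only [hi, Bool.false_eq_true, if_false]
                refine hrest d (e ++ [PySem.Str.rstrip l]) c false ?_
                rw [pvStepInner]
                simp [h2, h3, h4, hi]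
            · have hb4 : pvIsContent (PySem.Str.rstrip l) = false := by
                simpa using h4
              simp only [hb, hb4, Bool.and_false, Bool.false_eq_true, if_false]
              refine hrest d e c i ?_
              rw [pvStepInner]
              simp [h2, h3, hb4]

-- before the first header: everything is discarded on both sides
theorem pvL0 (ls : List String) (spells : PySem.Dict String (List (String × Option String)))
    (d : Option String) (e c : List String) (i : Bool) :
    pvFinishA (ls.foldl pvStepA (spells, none, d, e, c, i))
      = (pvFlush ((ls.map PySem.Str.rstrip).foldl pvSplitStep ([], none))).foldl pvInsStep spells := by
  induction ls generalizing d e c i with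
  | nil => simp [pvFinishA, pvSaveA, pvFlush]
  | cons l ls ih =>
    simp only [List.foldl_cons, List.map_cons, pvStepA, pvSplitStep]
    by_cases h1 : pvIsHeader (PySem.Str.rstrip l) = true
    · simp only [h1, if_pos, pvSaveA]
      exact pvL1 ls spells _ none [] [] false [] (fun _ => rfl)
    · by_cases h2 : pvIsDamage (PySem.Str.rstrip l) = true
      · simp only [h1, h2, if_pos, Bool.false_eq_true, if_false]
        exact ih _ _ _ _
      · by_cases h3 : pvIsCrit (PySem.Str.rstrip l) = true
        · simp only [h1, h2, h3, if_pos, Bool.false_eq_true, if_false]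
          exact ih _ _ _ _
        · simp only [h1, h2, h3, Bool.false_eq_true, if_false, Bool.false_and]
          exact ih d e c i

-- ===== VERDICT (by name: the statement is the Claim_ definition above) =====
theorem parse_source_spells_spec : Claim_equal_parse_source_spells := by
  intro text _
  show parse_source_spells text = parse_source_spells_alt text
  exact congrArg PySem.Dict.items (pvL0 _ PySem.Dict.empty none [] [] false)
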